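-- pv_equiv track=rewrite | github.com/pjw7904/Graph-Analyzer | PW_Scripts/test/mergeTest.py | mergePathBundles
-- ===== SOURCE A (Python) =====
-- def mergePathBundles(pathBundle1, pathBundle2):
--     greatBundle = []
--
--     if not pathBundle1 and not pathBundle2:
--        return greatBundle
--
--     elif pathBundle1 and not pathBundle2:
--        return greatBundle + pathBundle1
--
--     elif not pathBundle1 and pathBundle2:
--        return greatBundle + pathBundle2
--
--     elif pathBundle1 and pathBundle2:
--        if (len(pathBundle1[0]) < len(pathBundle2[0])) or (len(pathBundle1[0]) == len(pathBundle2[0]) and pathBundle1[0] < pathBundle2[0]):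
--           greatBundle.append(pathBundle1[0])
--           greatBundle = greatBundle +  mergePathBundles(pathBundle1[1:], pathBundle2)
--
--        else:
--           greatBundle.append(pathBundle2[0])
--           greatBundle = greatBundle +  mergePathBundles(pathBundle1, pathBundle2[1:])
--
--
--     return greatBundle
-- ===== SOURCE B (Python) =====
-- def mergePathBundles(pathBundle1, pathBundle2):
--     # Iterative two-pointer merge with indices (O(n+m)); no slicing recursion.
--     i = 0
--     j = 0
--     out = []
--     while i < len(pathBundle1) and j < len(pathBundle2):
--         a = pathBundle1[i]
--         b = pathBundle2[j]
--         if len(a) < len(b) or (len(a) == len(b) and a < b):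
--             out.append(a)
--             i += 1
--         else:
--             out.append(b)
--             j += 1
--     out.extend(pathBundle1[i:])
--     out.extend(pathBundle2[j:])
--     return out
-- ===== Notes on version B (the rewrite author's own statement) =====
-- stated objective: faster
-- what changed: Replaced A's recursive merge that copies list tails by slicing at each step with an iterative two-pointer merge over indices plus one final extend of the leftovers.
import Mathlib
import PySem

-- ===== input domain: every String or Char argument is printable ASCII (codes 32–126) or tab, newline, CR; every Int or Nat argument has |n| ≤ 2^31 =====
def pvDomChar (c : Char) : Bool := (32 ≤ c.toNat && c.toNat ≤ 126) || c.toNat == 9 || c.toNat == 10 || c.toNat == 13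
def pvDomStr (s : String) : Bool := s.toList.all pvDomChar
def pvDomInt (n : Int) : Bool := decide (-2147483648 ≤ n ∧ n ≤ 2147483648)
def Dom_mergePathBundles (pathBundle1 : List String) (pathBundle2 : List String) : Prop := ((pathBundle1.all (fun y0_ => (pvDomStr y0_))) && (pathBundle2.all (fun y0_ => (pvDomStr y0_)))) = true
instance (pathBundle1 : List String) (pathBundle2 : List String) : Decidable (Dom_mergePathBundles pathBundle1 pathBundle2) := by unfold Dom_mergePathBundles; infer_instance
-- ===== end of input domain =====

-- ===== PORT A =====
-- A: recursive merge; each call slices off the chosen head and recurses on the tails.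
-- (fuel = length p1 + length p2 is only a structural totality guard; it never runs out.)
def mergeA : Nat → List String → List String → List String
  | 0, _, _ => []
  | fuel + 1, pathBundle1, pathBundle2 =>
    match pathBundle1, pathBundle2 with
    | [], [] => []
    | x :: xs, [] => [] ++ (x :: xs)
    | [], y :: ys => [] ++ (y :: ys)
    | x :: xs, y :: ys =>
      if PySem.Str.len x < PySem.Str.len y ∨ (PySem.Str.len x = PySem.Str.len y ∧ x < y) then
        [x] ++ mergeA fuel xs (y :: ys)
      else
        [y] ++ mergeA fuel (x :: xs) ys

def mergePathBundles (pathBundle1 : List String) (pathBundle2 : List String) : List String :=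
  mergeA (pathBundle1.length + pathBundle2.length) pathBundle1 pathBundle2

-- ===== PORT B =====
-- B: the while loop of Source B — two index pointers i, j and an output accumulator;
-- pathBundle1[i:] / pathBundle2[j:] with 0 ≤ i, j are List.drop.
-- (fuel is only a structural totality guard; with fuel = length p1 + length p2 it never runs out.)
def mergeLoop : Nat → List String → List String → Nat → Nat → List String → List String
  | 0, p1, p2, i, j, out => out ++ p1.drop i ++ p2.drop j
  | fuel + 1, p1, p2, i, j, out =>
    if h : i < p1.length ∧ j < p2.length then
      let a := p1[i]
      let b := p2[j]
      if PySem.Str.len a < PySem.Str.len b ∨ (PySem.Str.len a = PySem.Str.len b ∧ a < b) then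
        mergeLoop fuel p1 p2 (i + 1) j (out ++ [a])
      else
        mergeLoop fuel p1 p2 i (j + 1) (out ++ [b])
    else
      out ++ p1.drop i ++ p2.drop j

def mergePathBundles_alt (pathBundle1 : List String) (pathBundle2 : List String) : List String :=
  mergeLoop (pathBundle1.length + pathBundle2.length) pathBundle1 pathBundle2 0 0 []

-- ===== PRECONDITION & SPEC =====
def Spec_mergePathBundles (pathBundle1 : List String) (pathBundle2 : List String) (out : List String) : Prop := out = mergePathBundles_alt pathBundle1 pathBundle2
instance (pathBundle1 : List String) (pathBundle2 : List String) (out : List String) : Decidable (Spec_mergePathBundles pathBundle1 pathBundle2 out) := by unfold Spec_mergePathBundles; infer_instance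

-- ===== CLAIM (what is proved, stated in full; the proofs are below) =====
def Claim_equal_mergePathBundles : Prop := ∀ (pathBundle1 : List String) (pathBundle2 : List String), Dom_mergePathBundles pathBundle1 pathBundle2 → Spec_mergePathBundles pathBundle1 pathBundle2 (mergePathBundles pathBundle1 pathBundle2)

-- ===== LEMMAS AND PROOFS =====
-- Loop invariant: with enough fuel, the two-pointer loop at (i, j) computes
-- out ++ (A's merge of the two remaining suffixes), with the same fuel.
theorem mergeLoop_eq (fuel : Nat) (p1 p2 : List String) (i j : Nat) (out : List String)
    (hf : (p1.length - i) + (p2.length - j) ≤ fuel) :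
    mergeLoop fuel p1 p2 i j out = out ++ mergeA fuel (p1.drop i) (p2.drop j) := by
  induction fuel generalizing i j out with
  | zero =>
    have hi : p1.length ≤ i := by omega
    have hj : p2.length ≤ j := by omega
    simp [mergeLoop, mergeA, List.drop_eq_nil_of_le hi, List.drop_eq_nil_of_le hj]
  | succ fuel ih =>
    rw [mergeLoop]
    by_cases h : i < p1.length ∧ j < p2.length
    · rw [dif_pos h]
      rw [List.drop_eq_getElem_cons h.1, List.drop_eq_getElem_cons h.2, mergeA]
      by_cases hc : PySem.Str.len p1[i] < PySem.Str.len p2[j] ∨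
          (PySem.Str.len p1[i] = PySem.Str.len p2[j] ∧ p1[i] < p2[j])
      · rw [if_pos hc, if_pos hc, ih (i + 1) j (out ++ [p1[i]]) (by omega)]
        rw [List.drop_eq_getElem_cons h.2]
        simp
      · rw [if_neg hc, if_neg hc, ih i (j + 1) (out ++ [p2[j]]) (by omega)]
        rw [List.drop_eq_getElem_cons h.1]
        simp
    · rw [dif_neg h]
      rcases Nat.lt_or_ge i p1.length with hi | hi
      · have hj : p2.length ≤ j := by omega
        rw [List.drop_eq_nil_of_le hj, List.drop_eq_getElem_cons hi, mergeA]
        simp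
      · rw [List.drop_eq_nil_of_le hi]
        cases hd : p2.drop j with
        | nil => simp [mergeA]
        | cons y ys => simp [mergeA]

-- ===== VERDICT (by name: the statement is the Claim_ definition above) =====
theorem mergePathBundles_spec : Claim_equal_mergePathBundles := by
  intro p1 p2 _
  unfold Spec_mergePathBundles mergePathBundles_alt mergePathBundles
  rw [mergeLoop_eq _ _ _ _ _ _ (by omega)]
  simp
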